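-- pv_equiv track=rewrite | github.com/DownUnderCTF/Challenges_2021_Public | rev/connect-the-dots/solve/solve.py | get_dot_ordering
-- ===== SOURCE A (Python) =====
-- from itertools import permutations
--
-- def get_dot_ordering(dot_data_):
--     dot_data = list(enumerate(dot_data_))
--     for perm in permutations(dot_data):
--         state = 0
--         for _, z in perm:
--             state &= (z >> 8)
--             state ^= (z & 0xff)
--         if state == 0xff:
--             return [i for i, _ in perm]
-- ===== SOURCE B (Python) =====
-- def get_dot_ordering(dot_data_):
--     zs = list(dot_data_)
--     n = len(zs)
--
--     def step(state, z):
--         state &= (z >> 8)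
--         state ^= (z & 0xff)
--         return state
--
--     memo = {}
--
--     def feasible(rem, state):
--         # can some ordering of the remaining indices `rem` drive `state` to 0xff?
--         key = (rem, state)
--         if key not in memo:
--             if not rem:
--                 memo[key] = (state == 0xff)
--             else:
--                 memo[key] = any(
--                     feasible(rem[:k] + rem[k + 1:], step(state, zs[rem[k]]))
--                     for k in range(len(rem)))
--         return memo[key]
--
--     def order(rem, state):
--         # lexicographically-first ordering of `rem` that reaches 0xff
--         for k in range(len(rem)):
--             sub = rem[:k] + rem[k + 1:]
--             ns = step(state, zs[rem[k]])
--             if feasible(sub, ns):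
--                 return [rem[k]] + order(sub, ns)
--         return []
--
--     rem0 = tuple(range(n))
--     if feasible(rem0, 0):
--         return order(rem0, 0)
--     return None
-- ===== Notes on version B (the rewrite author's own statement) =====
-- stated objective: faster
-- what changed: A scans all n! permutations and re-evaluates the 8-bit state chain for each; B memoises a subset-feasibility predicate (can the remaining indices drive the state to 0xff?) and reconstructs the lexicographically-first witness greedily, so each (remaining-set, state) pair is solved once.
import Mathlib
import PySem

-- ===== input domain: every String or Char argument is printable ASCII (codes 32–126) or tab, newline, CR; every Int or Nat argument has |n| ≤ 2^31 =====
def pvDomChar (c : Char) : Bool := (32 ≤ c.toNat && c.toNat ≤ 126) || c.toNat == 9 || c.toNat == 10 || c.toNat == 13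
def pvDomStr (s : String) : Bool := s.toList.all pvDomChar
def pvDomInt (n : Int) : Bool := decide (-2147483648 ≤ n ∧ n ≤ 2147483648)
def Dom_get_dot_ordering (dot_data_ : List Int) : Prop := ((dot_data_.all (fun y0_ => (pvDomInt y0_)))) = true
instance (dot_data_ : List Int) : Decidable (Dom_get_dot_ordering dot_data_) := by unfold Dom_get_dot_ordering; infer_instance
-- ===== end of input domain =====

-- B replaces A's brute-force scan of all n! permutations by memoised subset-feasibility
-- ("can the remaining indices drive the 8-bit state to 0xff?") plus a greedy
-- lexicographically-first reconstruction; objective: faster (asymptotic).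

-- the two state-update lines 'state &= (z >> 8); state ^= (z & 0xff)' shared verbatim by both Pythons
def pvStep (state z : Int) : Int :=
  PySem.Int.bxor (PySem.Int.band state (z >>> (8 : Nat))) (PySem.Int.band z 255)

-- ===== PORT A =====
-- A's `for perm in permutations(dot_data): …` consumes the LAZY itertools generator and
-- returns at the first hit; ported as the first-hit search over the generator's recursion
-- tree in the generator's order (same selection order as PySem.List.permutations), the
-- state fold being evaluated at each complete permutation exactly as A's inner loop does.
def pvFirst : List (Int × Int) → Nat → List (Int × Int) → Option (List (Int × Int))
  | _, 0, acc =>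
      if acc.foldl (fun state iz => pvStep state iz.2) 0 == 255 then some acc else none
  | xs, r + 1, acc =>
      (List.range xs.length).findSome? fun i =>
        match xs[i]? with
        | none => none
        | some x => pvFirst (xs.eraseIdx i) r (acc ++ [x])

def get_dot_ordering (dot_data_ : List Int) : Option (List Int) :=
  let dot_data := PySem.List.enumerate dot_data_ 0
  match pvFirst dot_data dot_data.length [] with
  | some perm => some (perm.map (·.1))
  | none => none

-- ===== PORT B =====
-- feasible(rem, state): some ordering of the remaining indices `rem` reaches 0xff
-- (the Python memoises this function; the memo is a pure cache, the recursion is identical)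
def pvFeas (zs : List Int) : List Nat → Int → Bool
  | [], state => state == 255
  | x :: rest, state =>
      (List.range (x :: rest).length).attach.any (fun k =>
        pvFeas zs ((x :: rest).eraseIdx k.1)
          (pvStep state (zs.getD ((x :: rest).getD k.1 0) 0)))
  termination_by rem _ => rem.length
  decreasing_by
    have hk := List.mem_range.mp k.2
    simp only [List.length_eraseIdx, hk, if_pos]
    omega

-- order(rem, state): take the first index whose removal stays feasible, recurse
def pvGreedy (zs : List Int) : List Nat → Int → List Nat
  | [], _ => []
  | x :: rest, state =>
    match h : (List.range (x :: rest).length).find? (fun k =>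
        pvFeas zs ((x :: rest).eraseIdx k)
          (pvStep state (zs.getD ((x :: rest).getD k 0) 0))) with
    | none => []   -- unreachable when pvFeas holds; totality branch (Python's `return []`)
    | some k =>
        (x :: rest).getD k 0 ::
          pvGreedy zs ((x :: rest).eraseIdx k)
            (pvStep state (zs.getD ((x :: rest).getD k 0) 0))
  termination_by rem _ => rem.length
  decreasing_by
    have hk := List.mem_range.mp (List.mem_of_find?_eq_some h)
    simp only [List.length_eraseIdx, hk, if_pos]
    omega

def get_dot_ordering_alt (dot_data_ : List Int) : Option (List Int) :=
  let zs := dot_data_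
  let rem0 := List.range zs.length
  if pvFeas zs rem0 0 then some ((pvGreedy zs rem0 0).map (fun k : Nat => (k : Int))) else none

-- ===== PRECONDITION & SPEC =====
def Spec_get_dot_ordering (dot_data_ : List Int) (out : Option (List Int)) : Prop := out = get_dot_ordering_alt dot_data_
instance (dot_data_ : List Int) (out : Option (List Int)) : Decidable (Spec_get_dot_ordering dot_data_ out) := by unfold Spec_get_dot_ordering; infer_instance

-- ===== CLAIM (what is proved, stated in full; the proofs are below) =====
def Claim_equal_get_dot_ordering : Prop := ∀ (dot_data_ : List Int), Dom_get_dot_ordering dot_data_ → Spec_get_dot_ordering dot_data_ (get_dot_ordering dot_data_)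

-- ===== LEMMAS AND PROOFS =====

-- the index-level state update B threads through its recursion
def pvF (zs : List Int) (s : Int) (i : Nat) : Int := pvStep s (zs.getD i 0)

-- one unfolding of PySem.List.permutations at a successor count
theorem pvPerms_succ {α : Type} (xs : List α) (m : Nat) :
    PySem.List.permutations xs (m + 1) =
      (List.range xs.length).flatMap (fun i =>
        match xs[i]? with
        | none => []
        | some x => (PySem.List.permutations (xs.eraseIdx i) m).map (x :: ·)) := by
  rw [PySem.List.permutations]; rfl

-- permutations commutes with map (positional selection is oblivious to the values)
theorem pvPerms_map {α β : Type} (f : α → β) :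
    ∀ (r : Nat) (xs : List α),
      PySem.List.permutations (xs.map f) r = (PySem.List.permutations xs r).map (List.map f) := by
  intro r
  induction r with
  | zero => intro xs; simp [PySem.List.permutations_zero]
  | succ m ih =>
      intro xs
      rw [pvPerms_succ, pvPerms_succ, List.length_map, List.map_flatMap]
      refine congrArg (fun g => List.flatMap g (List.range xs.length)) (funext fun i => ?_)
      cases h : xs[i]? with
      | none => simp [List.getElem?_map, h]
      | some x =>
          simp [List.getElem?_map, h, List.eraseIdx_map, ih, List.map_map, Function.comp]

-- findSome? of a guarded some is find? then map
theorem pvFindSome?_guard {α β : Type} (l : List α) (c : α → Bool) (h : α → β) :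
    l.findSome? (fun i => if c i then some (h i) else none) =
      (l.find? c).map h := by
  induction l with
  | nil => rfl
  | cons a as ih =>
      by_cases hc : c a <;> simp [List.find?_cons, hc, ih]

theorem pvFindSome?_congr {α β : Type} {l : List α} {f g : α → Option β}
    (h : ∀ x ∈ l, f x = g x) : l.findSome? f = l.findSome? g := by
  induction l with
  | nil => rfl
  | cons a as ih =>
      simp only [List.findSome?_cons, h a (List.mem_cons_self), ih (fun x hx => h x (List.mem_cons_of_mem a hx))]

-- unfold pvFeas on a nonempty list, with the attach removed
theorem pvFeas_cons (zs : List Int) (x : Nat) (rest : List Nat) (s : Int) :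
    pvFeas zs (x :: rest) s =
      (List.range (x :: rest).length).any (fun k =>
        pvFeas zs ((x :: rest).eraseIdx k)
          (pvStep s (zs.getD ((x :: rest).getD k 0) 0))) := by
  conv_lhs => rw [pvFeas]
  conv_rhs => rw [← List.attach_map_subtype_val (List.range (x :: rest).length)]
  rw [List.any_map]
  rfl

-- the base case: the only permutation of [] is []
theorem pvMain_nil (zs : List Int) (s : Int) :
      pvFeas zs [] s =
        ((PySem.List.permutations ([] : List Nat) ([] : List Nat).length).any
          (fun p => p.foldl (pvF zs) s == 255))
      ∧ (PySem.List.permutations ([] : List Nat) ([] : List Nat).length).find?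
            (fun p => p.foldl (pvF zs) s == 255) =
          (if pvFeas zs [] s then some (pvGreedy zs [] s) else none) := by
  have h0 : PySem.List.permutations ([] : List Nat) 0 = [[]] :=
    PySem.List.permutations_zero []
  constructor
  · simp [pvFeas, h0]
  · by_cases hs : s == 255 <;> simp [pvFeas, pvGreedy, h0, List.find?, hs]

-- a find? characterised by a guard determines any
theorem pvAny_eq_of_find? {α : Type} {l : List α} {p : α → Bool} {c : Bool} {y : α}
    (h : l.find? p = if c = true then some y else none) : l.any p = c := by
  cases c with
  | false =>
      simp only [Bool.false_eq_true, if_false] at h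
      rw [List.any_eq_false]
      intro a ha
      simpa using List.find?_eq_none.mp h a ha
  | true =>
      simp only [if_true] at h
      exact List.any_eq_true.mpr (List.find?_isSome.mp (by rw [h]; rfl))

theorem pvFlatMap_congr {α β : Type} {l : List α} {f g : α → List β}
    (h : ∀ x ∈ l, f x = g x) : l.flatMap f = l.flatMap g := by
  induction l with
  | nil => rfl
  | cons a as ih => simp_all

-- the unfolding of permutations on a nonempty list, matchless
theorem pvPerms_cons (x : Nat) (rest : List Nat) :
    PySem.List.permutations (x :: rest) (x :: rest).length =
      (List.range (x :: rest).length).flatMap (fun i =>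
        (PySem.List.permutations ((x :: rest).eraseIdx i) rest.length).map
          ((x :: rest).getD i 0 :: ·)) := by
  rw [List.length_cons, pvPerms_succ, List.length_cons]
  refine pvFlatMap_congr (fun i hi => ?_)
  have hi' : i < (x :: rest).length := by simpa using List.mem_range.mp hi
  rw [List.getElem?_eq_getElem hi', List.getD_eq_getElem _ _ hi']

-- MAIN: B's feasibility predicate and greedy reconstruction characterise A's
-- first-hit scan over permutations (joint induction on list length)
theorem pvMain (zs : List Int) :
    ∀ (n : Nat) (rem : List Nat), rem.length ≤ n → ∀ (s : Int),
      pvFeas zs rem s =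
        ((PySem.List.permutations rem rem.length).any
          (fun p => p.foldl (pvF zs) s == 255))
      ∧ (PySem.List.permutations rem rem.length).find?
            (fun p => p.foldl (pvF zs) s == 255) =
          (if pvFeas zs rem s then some (pvGreedy zs rem s) else none) := by
  intro n
  induction n with
  | zero =>
      intro rem hlen s
      cases rem with
      | nil => exact pvMain_nil zs s
      | cons x rest => simp at hlen
  | succ n ih =>
      intro rem hlen s
      cases rem with
      | nil => exact pvMain_nil zs s
      | cons x rest =>
        have hlen' : rest.length ≤ n := by simpa using hlen
        -- the value of block i of the flatMap, for find?
        have hblockF : ∀ i ∈ List.range (x :: rest).length,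
            (((PySem.List.permutations ((x :: rest).eraseIdx i) rest.length).map
                ((x :: rest).getD i 0 :: ·)).find?
              (fun p => p.foldl (pvF zs) s == 255))
            = (if pvFeas zs ((x :: rest).eraseIdx i)
                    (pvStep s (zs.getD ((x :: rest).getD i 0) 0))
               then some ((x :: rest).getD i 0 ::
                      pvGreedy zs ((x :: rest).eraseIdx i)
                        (pvStep s (zs.getD ((x :: rest).getD i 0) 0)))
               else none) := by
          intro i hi
          have hi' : i < (x :: rest).length := List.mem_range.mp hi
          have hlenE : ((x :: rest).eraseIdx i).length = rest.length := by
            rw [List.length_eraseIdx, if_pos hi']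
            rfl
          have hIH := (ih ((x :: rest).eraseIdx i) (by omega)
            (pvStep s (zs.getD ((x :: rest).getD i 0) 0))).2
          rw [hlenE] at hIH
          rw [List.find?_map]
          have hpred : ((fun p => p.foldl (pvF zs) s == 255) ∘ (((x :: rest).getD i 0) :: ·))
              = (fun q => q.foldl (pvF zs)
                  (pvStep s (zs.getD ((x :: rest).getD i 0) 0)) == 255) := rfl
          rw [hpred, hIH]
          by_cases hc : pvFeas zs ((x :: rest).eraseIdx i)
              (pvStep s (zs.getD ((x :: rest).getD i 0) 0)) = true
          · simp [hc]
          · rw [Bool.not_eq_true] at hc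
            simp [hc]
        -- the same for any
        have hblockA : ∀ i ∈ List.range (x :: rest).length,
            (((PySem.List.permutations ((x :: rest).eraseIdx i) rest.length).map
                ((x :: rest).getD i 0 :: ·)).any
              (fun p => p.foldl (pvF zs) s == 255))
            = pvFeas zs ((x :: rest).eraseIdx i)
                (pvStep s (zs.getD ((x :: rest).getD i 0) 0)) :=
          fun i hi => pvAny_eq_of_find? (hblockF i hi)
        -- conjunct 1
        have hany : pvFeas zs (x :: rest) s =
            ((PySem.List.permutations (x :: rest) (x :: rest).length).any
              (fun p => p.foldl (pvF zs) s == 255)) := by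
          rw [pvPerms_cons, List.any_flatMap, PySem.List.any_congr_mem hblockA, pvFeas_cons]
        refine ⟨hany, ?_⟩
        -- conjunct 2
        rw [pvPerms_cons, List.find?_flatMap, pvFindSome?_congr hblockF, pvFindSome?_guard]
        cases hfind : (List.range (x :: rest).length).find? (fun i =>
            pvFeas zs ((x :: rest).eraseIdx i)
              (pvStep s (zs.getD ((x :: rest).getD i 0) 0))) with
        | none =>
            have hfalse : pvFeas zs (x :: rest) s = false := by
              rw [pvFeas_cons]
              simp only [List.any_eq_false]
              intro i hi
              simpa using List.find?_eq_none.mp hfind i hi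
            simp [hfalse]
        | some k =>
            have hpk := List.find?_some hfind
            have htrue : pvFeas zs (x :: rest) s = true := by
              rw [pvFeas_cons, List.any_eq_true]
              exact ⟨k, List.mem_of_find?_eq_some hfind, by simpa using hpk⟩
            have hgreedy : pvGreedy zs (x :: rest) s =
                (x :: rest).getD k 0 ::
                  pvGreedy zs ((x :: rest).eraseIdx k)
                    (pvStep s (zs.getD ((x :: rest).getD k 0) 0)) := by
              rw [pvGreedy]
              split
              · rename_i heq
                rw [hfind] at heq; cases heq
              · rename_i k' heq
                rw [hfind] at heq
                cases heq; rfl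
            simp [htrue, hgreedy]

theorem pvFindSome?_optMap {α β γ : Type} (l : List α) (g : α → Option β) (f : β → γ) :
    (l.findSome? g).map f = l.findSome? (fun a => (g a).map f) := by
  induction l with
  | nil => rfl
  | cons a as ih => cases h : g a <;> simp [List.findSome?_cons, h, ih]

-- the fused first-hit search IS find? over the materialised permutation list
theorem pvFirst_eq (r : Nat) :
    ∀ (xs acc : List (Int × Int)),
      pvFirst xs r acc =
        ((PySem.List.permutations xs r).find?
          (fun p => (acc ++ p).foldl (fun state iz => pvStep state iz.2) 0 == 255)).map
            (acc ++ ·) := by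
  induction r with
  | zero =>
      intro xs acc
      rw [PySem.List.permutations_zero]
      by_cases h : (acc.foldl (fun state iz => pvStep state iz.2) 0 == 255) = true <;>
        simp [pvFirst, List.find?_cons, h]
  | succ r ih =>
      intro xs acc
      rw [pvPerms_succ, List.find?_flatMap, pvFindSome?_optMap]
      show (List.range xs.length).findSome? _ = _
      refine pvFindSome?_congr (fun i _ => ?_)
      cases hget : xs[i]? with
      | none => simp [hget]
      | some x =>
          simp only [hget]
          have hpred : ((fun p => (acc ++ p).foldl (fun state iz => pvStep state iz.2) 0 == 255)
                ∘ (x :: ·))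
              = (fun p => ((acc ++ [x]) ++ p).foldl (fun state iz => pvStep state iz.2) 0 == 255) := by
            funext p
            simp [Function.comp, List.append_assoc]
          rw [List.find?_map, Option.map_map, hpred, ih (xs.eraseIdx i) (acc ++ [x])]
          refine congrArg (fun f => Option.map f _) (funext fun p => ?_)
          simp [Function.comp, List.append_assoc]

-- enumerate as a map over range
theorem pvEnum_eq (zs : List Int) :
    PySem.List.enumerate zs 0 =
      (List.range zs.length).map (fun k : Nat => ((k : Int), zs.getD k 0)) := by
  rw [PySem.List.enumerate_eq_map_pyRange (d := 0), PySem.List.len_eq, PySem.List.pyRange_one,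
    List.map_map]
  simp only [Int.sub_zero, Int.toNat_natCast]
  refine List.map_congr_left (fun k hk => ?_)
  simp [Function.comp, PySem.List.pyGetD_natCast]

-- ===== VERDICT (by name: the statement is the Claim_ definition above) =====
theorem get_dot_ordering_spec : Claim_equal_get_dot_ordering := by
  intro zs _
  unfold Spec_get_dot_ordering get_dot_ordering get_dot_ordering_alt
  show (match pvFirst (PySem.List.enumerate zs 0) (PySem.List.enumerate zs 0).length [] with
        | some perm => some (perm.map (·.1))
        | none => none)
      = (if pvFeas zs (List.range zs.length) 0 = true
         then some ((pvGreedy zs (List.range zs.length) 0).map (fun k : Nat => (k : Int)))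
         else none)
  rw [pvFirst_eq]
  have hmain := (pvMain zs zs.length (List.range zs.length) (by simp) 0).2
  rw [List.length_range] at hmain
  have hpred : ((fun (perm : List (Int × Int)) =>
        perm.foldl (fun state iz => pvStep state iz.2) 0 == 255) ∘
          (List.map (fun k : Nat => ((k : Int), zs.getD k 0))))
      = (fun q : List Nat => q.foldl (pvF zs) 0 == 255) := by
    funext q
    simp only [Function.comp, List.foldl_map]
    rfl
  simp only [List.nil_append, Option.map_id', pvEnum_eq, List.length_map, List.length_range,
    pvPerms_map (fun k : Nat => ((k : Int), zs.getD k 0)) zs.length,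
    List.find?_map, hpred, hmain]
  by_cases hc : pvFeas zs (List.range zs.length) 0 = true
  · simp only [hc, if_true, Option.map_some]
    refine congrArg some ?_
    conv_lhs => rw [List.map_map]
    exact congrArg (fun f => List.map f (pvGreedy zs (List.range zs.length) 0))
      (funext fun k => rfl)
  · simp [hc]
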